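-- pv_equiv track=rewrite | github.com/Wazzabeee/copy-spotter | scripts/main.py | get_ordered_blocks_positions
-- ===== SOURCE A (Python) =====
-- from operator import itemgetter
--
-- def get_ordered_blocks_positions(string: str, matching_blocks: list, string_blocks: list) -> list:
--     """ Return ordered list of all positions of matching blocks in string """
--
--     all_blocks_positions = []
--
--     for block_ind, block in enumerate(matching_blocks):
--         # Find all positions of substring in string
--         block_positions = [char for char in range(len(string)) if string.startswith(string_blocks[
--                                                                                    block_ind],
--                                                                               char)]
--         for position in block_positions:
--             all_blocks_positions.append((position, block_ind))
--
--     return sorted(all_blocks_positions, key=itemgetter(0))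
-- ===== SOURCE B (Python) =====
-- def get_ordered_blocks_positions(string: str, matching_blocks: list, string_blocks: list) -> list:
--     """ Return ordered list of all positions of matching blocks in string """
--     # Loop interchange: scan positions in the outer loop, blocks in the inner one.
--     # Pairs are emitted in (position, block_ind) order already, so no sort is needed:
--     # this equals A's stable position-sort of the block-major list.
--     all_blocks_positions = []
--     for position in range(len(string)):
--         for block_ind in range(len(matching_blocks)):
--             if string.startswith(string_blocks[block_ind], position):
--                 all_blocks_positions.append((position, block_ind))
--     return all_blocks_positions
-- ===== Notes on version B (the rewrite author's own statement) =====
-- stated objective: simpler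
-- what changed: Loop interchange: positions outer, blocks inner, so pairs come out already position-sorted (with the same tie order by block index that A's stable sort produces) and the final sort and itemgetter disappear.
import Mathlib
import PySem

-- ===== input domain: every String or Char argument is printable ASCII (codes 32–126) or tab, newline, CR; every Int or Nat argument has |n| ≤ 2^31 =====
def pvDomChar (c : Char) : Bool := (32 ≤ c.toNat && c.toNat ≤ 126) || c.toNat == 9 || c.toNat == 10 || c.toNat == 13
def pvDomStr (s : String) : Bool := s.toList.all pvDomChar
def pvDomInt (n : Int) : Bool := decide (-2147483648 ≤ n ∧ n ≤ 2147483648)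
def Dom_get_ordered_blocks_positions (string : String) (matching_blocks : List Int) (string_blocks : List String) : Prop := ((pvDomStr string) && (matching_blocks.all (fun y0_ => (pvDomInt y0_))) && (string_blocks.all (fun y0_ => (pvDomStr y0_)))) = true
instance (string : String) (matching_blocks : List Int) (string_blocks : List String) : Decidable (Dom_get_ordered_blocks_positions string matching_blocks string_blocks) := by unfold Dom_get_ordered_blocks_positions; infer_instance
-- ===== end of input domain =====

-- B replaces A's block-major scan + stable position-sort by a position-major double loop
-- that emits the pairs already in sorted order (same tie order), dropping the sort.

-- ===== PORT A =====
-- string.startswith(block, char) with char drawn from range(len(string)) (so 0 ≤ char):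
-- exactly "block is a prefix of string[char:]", i.e. Chars.startswith on toList.drop.
def get_ordered_blocks_positions (string : String) (matching_blocks : List Int) (string_blocks : List String) : List (Int × Int) :=
  let all_blocks_positions :=
    (PySem.List.enumerate matching_blocks).foldl (fun acc be =>
      let block_positions :=
        (PySem.List.pyRange 0 (PySem.Str.len string)).filter (fun ch =>
          PySem.Chars.startswith (string.toList.drop ch.toNat)
            ((PySem.List.pyGetD string_blocks be.1 "").toList))
      block_positions.foldl (fun a position => a ++ [(position, be.1)]) acc) []
  PySem.List.sorted all_blocks_positions (fun x => x.1) false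

-- ===== PORT B =====
def get_ordered_blocks_positions_alt (string : String) (matching_blocks : List Int) (string_blocks : List String) : List (Int × Int) :=
  (PySem.List.pyRange 0 (PySem.Str.len string)).foldl (fun acc position =>
    (PySem.List.pyRange 0 ((matching_blocks.length : Int))).foldl (fun a block_ind =>
      if PySem.Chars.startswith (string.toList.drop position.toNat)
           ((PySem.List.pyGetD string_blocks block_ind "").toList)
      then a ++ [(position, block_ind)] else a) acc) []

-- ===== PRECONDITION & SPEC =====
-- Both Pythons raise IndexError (string_blocks[block_ind]) exactly when the string is
-- non-empty and matching_blocks is longer than string_blocks; Pre_ excludes only that.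
def Pre_get_ordered_blocks_positions (string : String) (matching_blocks : List Int) (string_blocks : List String) : Prop :=
  string.toList = [] ∨ matching_blocks.length ≤ string_blocks.length
instance (string : String) (matching_blocks : List Int) (string_blocks : List String) : Decidable (Pre_get_ordered_blocks_positions string matching_blocks string_blocks) := by unfold Pre_get_ordered_blocks_positions; infer_instance
def pvWitness_get_ordered_blocks_positions : String × List Int × List String := ("abcab", [7, 3], ["ab", "b"])
def Spec_get_ordered_blocks_positions (string : String) (matching_blocks : List Int) (string_blocks : List String) (out : List (Int × Int)) : Prop := out = get_ordered_blocks_positions_alt string matching_blocks string_blocks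
instance (string : String) (matching_blocks : List Int) (string_blocks : List String) (out : List (Int × Int)) : Decidable (Spec_get_ordered_blocks_positions string matching_blocks string_blocks out) := by unfold Spec_get_ordered_blocks_positions; infer_instance

-- ===== CLAIM (what is proved, stated in full; the proofs are below) =====
def Claim_equal_get_ordered_blocks_positions : Prop := ∀ (string : String) (matching_blocks : List Int) (string_blocks : List String), Dom_get_ordered_blocks_positions string matching_blocks string_blocks → Pre_get_ordered_blocks_positions string matching_blocks string_blocks → Spec_get_ordered_blocks_positions string matching_blocks string_blocks (get_ordered_blocks_positions string matching_blocks string_blocks)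

-- ===== LEMMAS AND PROOFS =====

-- the match test at block index bi, position p
def pvQ (c : List Char) (sb : List String) (bi p : Nat) : Bool :=
  PySem.Chars.startswith (c.drop p) ((PySem.List.pyGetD sb (bi : Int) "").toList)

-- one position-major "row": all blocks among the first m that match at position p
def pvRow (c : List Char) (sb : List String) (m p : Nat) : List (Int × Int) :=
  ((List.range m).filter (fun bi => pvQ c sb bi p)).map (fun (bi : Nat) => ((p : Int), (bi : Int)))

-- B's result: rows for every position of the string
def pvF (c : List Char) (sb : List String) (m n : Nat) : List (Int × Int) :=
  (List.range n).flatMap (pvRow c sb m)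

-- one block-major "column": all positions where block bi matches
def pvCol (c : List Char) (sb : List String) (n bi : Nat) : List (Int × Int) :=
  ((List.range n).filter (fun p => pvQ c sb bi p)).map (fun (p : Nat) => ((p : Int), (bi : Int)))

-- A's unsorted list: columns for every block
def pvL (c : List Char) (sb : List String) (m n : Nat) : List (Int × Int) :=
  (List.range m).flatMap (pvCol c sb n)

-- stable insertion of x into ys ++ zs lands left of zs when x goes before all of zs
lemma pvInsertBy_append_of_before {α : Type} (before : α → α → Bool) (x : α) (ys zs : List α)
    (h : ∀ z ∈ zs, before x z = true) :
    PySem.List.insertBy before x (ys ++ zs) = PySem.List.insertBy before x ys ++ zs := by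
  induction ys with
  | nil =>
    cases zs with
    | nil => rfl
    | cons z t => simp [PySem.List.insertBy, h z (by simp)]
  | cons y t ih =>
    by_cases hy : before x y = true <;> simp [PySem.List.insertBy, hy, ih]

-- a run of such insertions leaves the zs suffix in place
lemma pvFoldl_insertBy_append (l ys zs : List (Int × Int))
    (h : ∀ x ∈ l, ∀ z ∈ zs, x.1 < z.1) :
    l.foldl (fun acc x => PySem.List.insertBy (fun a b => decide (a.1 < b.1)) x acc) (ys ++ zs)
      = l.foldl (fun acc x => PySem.List.insertBy (fun a b => decide (a.1 < b.1)) x acc) ys ++ zs := by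
  induction l generalizing ys with
  | nil => rfl
  | cons x t ih =>
    simp only [List.foldl_cons]
    rw [pvInsertBy_append_of_before _ x ys zs (fun z hz => by simp [h x (by simp) z hz]),
        ih _ (fun x' hx' z hz => h x' (by simp [hx']) z hz)]

lemma pvRow_fst_eq (c : List Char) (sb : List String) (m n : Nat) :
    ∀ z ∈ pvRow c sb m n, z.1 = (n : Int) := by
  intro z hz
  obtain ⟨bi, _, rfl⟩ := List.mem_map.mp hz
  rfl

lemma pvCol_fst_lt (c : List Char) (sb : List String) (n k : Nat) :
    ∀ x ∈ pvCol c sb n k, x.1 < (n : Int) := by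
  intro x hx
  obtain ⟨p, hp, rfl⟩ := List.mem_map.mp hx
  have := List.mem_range.mp (List.mem_filter.mp hp).1
  show (p : Int) < (n : Int)
  exact_mod_cast this

lemma pvF_fst_lt (c : List Char) (sb : List String) (m n : Nat) :
    ∀ x ∈ pvF c sb m n, x.1 < (n : Int) := by
  intro x hx
  obtain ⟨p, hp, hx⟩ := List.mem_flatMap.mp hx
  rw [pvRow_fst_eq c sb m p x hx]
  exact_mod_cast List.mem_range.mp hp

-- inserting one column of ascending positions into the first k rows adds block k to every row
lemma pvStep (c : List Char) (sb : List String) (k : Nat) :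
    ∀ n, (pvCol c sb n k).foldl
        (fun acc x => PySem.List.insertBy (fun a b => decide (a.1 < b.1)) x acc) (pvF c sb k n)
      = pvF c sb (k + 1) n := by
  intro n
  induction n with
  | zero => rfl
  | succ n ih =>
    have hcol : pvCol c sb (n + 1) k
        = pvCol c sb n k ++ (if pvQ c sb k n then [((n : Int), (k : Int))] else []) := by
      simp only [pvCol, List.range_succ, List.filter_append]
      by_cases h : pvQ c sb k n <;> simp [h]
    have hF : ∀ m, pvF c sb m (n + 1) = pvF c sb m n ++ pvRow c sb m n := by
      intro m; simp [pvF, List.range_succ]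
    have hrow : pvRow c sb (k + 1) n
        = pvRow c sb k n ++ (if pvQ c sb k n then [((n : Int), (k : Int))] else []) := by
      simp only [pvRow, List.range_succ, List.filter_append]
      by_cases h : pvQ c sb k n <;> simp [h]
    have hfront : (pvCol c sb n k).foldl
        (fun acc x => PySem.List.insertBy (fun a b => decide (a.1 < b.1)) x acc)
        (pvF c sb k n ++ pvRow c sb k n)
        = pvF c sb (k + 1) n ++ pvRow c sb k n := by
      rw [pvFoldl_insertBy_append _ _ _ ?_, ih]
      intro x hx z hz
      rw [pvRow_fst_eq c sb k n z hz]
      exact pvCol_fst_lt c sb n k x hx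
    rw [hcol, hF k, List.foldl_append, hfront, hF (k + 1), hrow]
    by_cases h : pvQ c sb k n
    · simp only [h, if_true, List.foldl_cons, List.foldl_nil]
      rw [PySem.List.insertBy_of_forall_not_before]
      · simp
      · intro y hy
        rcases List.mem_append.mp hy with hy | hy
        · have := pvF_fst_lt c sb (k + 1) n y hy
          simp; omega
        · have := pvRow_fst_eq c sb k n y hy
          simp [this]
    · simp [h]

-- A's stable sort, run as its insertion-sort unfolding, produces B's position-major list
lemma pvMain (c : List Char) (sb : List String) (n : Nat) :
    ∀ m, (pvL c sb m n).foldl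
        (fun acc x => PySem.List.insertBy (fun a b => decide (a.1 < b.1)) x acc) []
      = pvF c sb m n := by
  intro m
  induction m with
  | zero => simp [pvL, pvF, pvRow]
  | succ k ih =>
    have : pvL c sb (k + 1) n = pvL c sb k n ++ pvCol c sb n k := by
      simp [pvL, List.range_succ]
    rw [this, List.foldl_append, ih, pvStep]

lemma pvA_norm (s : String) (mb : List Int) (sb : List String) :
    get_ordered_blocks_positions s mb sb
      = PySem.List.sorted (pvL s.toList sb mb.length s.toList.length) (fun x => x.1) false := by
  unfold get_ordered_blocks_positions
  rw [PySem.List.enumerate_eq_map_pyRange mb 0]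
  simp only [PySem.List.len, PySem.Str.len_eq, PySem.List.pyRange_zero_natCast, List.foldl_map,
    List.filter_map, PySem.List.foldl_append_singleton_eq_map, List.map_map]
  rw [PySem.List.foldl_congr_mem _ _
    (fun acc bi => acc ++ pvCol s.toList sb s.toList.length bi) _ ?_]
  · rw [PySem.List.foldl_append_eq_flatMap]; rfl
  · intro acc bi _
    simp [pvCol, pvQ, Function.comp_def, PySem.List.pyGetD_natCast,
      List.getD_eq_getElem?_getD]

lemma pvB_norm (s : String) (mb : List Int) (sb : List String) :
    get_ordered_blocks_positions_alt s mb sb = pvF s.toList sb mb.length s.toList.length := by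
  unfold get_ordered_blocks_positions_alt
  simp only [PySem.Str.len_eq, PySem.List.pyRange_zero_natCast, List.foldl_map]
  rw [PySem.List.foldl_congr_mem _ _
    (fun acc p => acc ++ pvRow s.toList sb mb.length p) _ ?_]
  · rw [PySem.List.foldl_append_eq_flatMap]; rfl
  · intro acc p _
    have h := PySem.List.foldl_append_if
      (p := fun bi : Nat => pvQ s.toList sb bi p)
      (f := fun bi : Nat => ((p : Int), (bi : Int))) (List.range mb.length) acc
    simp only [pvQ] at h
    simpa [pvRow, pvQ] using h

-- ===== VERDICT (by name: the statement is the Claim_ definition above) =====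
theorem get_ordered_blocks_positions_spec : Claim_equal_get_ordered_blocks_positions := by
  intro s mb sb _ _
  unfold Spec_get_ordered_blocks_positions
  rw [pvA_norm, pvB_norm, PySem.List.sorted_eq_foldl_insertBy, pvMain]
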